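-- pv_equiv track=rewrite | github.com/DoutorRaposo/CS50-Courses | CS50X/week6/opts6/seven-day-average/seven-day-average.py | calculate
-- ===== SOURCE A (Python) =====
-- def calculate(reader):
--     new_cases = dict()
--     previous_cases = dict()
--
--     for row in reader:
--         if row['state'] not in previous_cases:
--             previous_cases[row['state']] = row['cases']
--             # Basically saying that the state in said row is a key and the value is the number of cases in the row
--             new_cases[row['state']] = []
--             # We must use the value as a list, so we can get several values inside. The key is the name of the state and the value is the number of cases
--         else:
--             cases = int(row['cases']) - int(previous_cases[row['state']])
--             # The number of new cases is the number of total cases today minus the total of yesterday.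
--             previous_cases[row['state']] = row['cases']
--             # Updating the cases for the next iteration.
--             new_cases[row['state']].append(cases)
--             # Appending to the list we created in the first instance.
--             if len(new_cases[row['state']]) > 14:
--                 # and removing if there's more than 14 members in the list. Thank God for dynamic lists.
--                 new_cases[row['state']].pop(0)
--
--     return new_cases
-- ===== SOURCE B (Python) =====
-- def calculate(reader):
--     # Group all raw 'cases' strings by state (insertion order), then difference
--     # each state's series in one go and keep the last 14 deltas by slicing.
--     groups = {}
--     for row in reader:
--         groups.setdefault(row['state'], []).append(row['cases'])
--     return {state: [int(b) - int(a) for a, b in zip(vals, vals[1:])][-14:]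
--             for state, vals in groups.items()}
-- ===== Notes on version B (the rewrite author's own statement) =====
-- stated objective: simpler
-- what changed: B replaces A's interleaved single pass over two dicts (a previous-value dict plus a rolling capped-at-14 window maintained with append/pop per row) by grouping each state's raw case strings in one pass and then, per state, differencing consecutive values and keeping the last 14 with a slice.
import Mathlib
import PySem

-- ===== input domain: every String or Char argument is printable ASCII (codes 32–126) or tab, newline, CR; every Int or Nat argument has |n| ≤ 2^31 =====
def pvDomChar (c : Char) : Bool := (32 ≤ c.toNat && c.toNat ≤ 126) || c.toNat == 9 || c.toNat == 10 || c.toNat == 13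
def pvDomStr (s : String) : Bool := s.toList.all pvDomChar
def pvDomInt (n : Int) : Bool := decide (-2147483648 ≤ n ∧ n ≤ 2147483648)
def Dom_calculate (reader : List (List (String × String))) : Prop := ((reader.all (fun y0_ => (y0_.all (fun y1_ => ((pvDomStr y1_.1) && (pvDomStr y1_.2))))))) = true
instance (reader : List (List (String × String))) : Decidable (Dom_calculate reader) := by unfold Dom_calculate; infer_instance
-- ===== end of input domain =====

-- B groups each state's raw case strings in one pass and then differences/slices per state,
-- instead of A's interleaved rolling window over two dicts; objective: simpler, same cost.

-- ===== PORT A =====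
-- row['k']: total form of the dict lookup; Pre_ guarantees the key is present.
def pvField (row : List (String × String)) (k : String) : String :=
  ((PySem.Dict.mk row).get? k).getD ""

-- int(s): total form; Pre_ guarantees every conversion A performs succeeds.
def pvInt (s : String) : Int := (PySem.Int.ofStr? s).getD 0

def calcStep (st : PySem.Dict String (List Int) × PySem.Dict String String)
    (row : List (String × String)) :
    PySem.Dict String (List Int) × PySem.Dict String String :=
  let new_cases := st.1
  let previous_cases := st.2
  if previous_cases.contains (pvField row "state") = false then
    (new_cases.insert (pvField row "state") [],
     previous_cases.insert (pvField row "state") (pvField row "cases"))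
  else
    let cases := pvInt (pvField row "cases") - pvInt (previous_cases.getD (pvField row "state") "")
    let previous_cases := previous_cases.insert (pvField row "state") (pvField row "cases")
    let new_cases := new_cases.modify (pvField row "state") [] (fun l => l ++ [cases])
    let new_cases :=
      if 14 < (new_cases.getD (pvField row "state") []).length then
        -- pop(0): the list has length > 14, so dropping the head is exact
        new_cases.modify (pvField row "state") [] (fun l => l.drop 1)
      else new_cases
    (new_cases, previous_cases)

def calculate (reader : List (List (String × String))) : List (String × List Int) :=
  (reader.foldl calcStep (PySem.Dict.empty, PySem.Dict.empty)).1.items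

-- ===== PORT B =====
def calculate_alt (reader : List (List (String × String))) : List (String × List Int) :=
  let groups : PySem.Dict String (List String) :=
    reader.foldl
      (fun g row => g.modify (pvField row "state") [] (fun l => l ++ [pvField row "cases"]))
      PySem.Dict.empty
  groups.items.map (fun p =>
    (p.1, PySem.List.slice (List.zipWith (fun a b => pvInt b - pvInt a) p.2 (p.2.drop 1))
            (some (-14)) none))

-- ===== PRECONDITION & SPEC =====
-- Pre_ excludes exactly the inputs where the Python raises: a row missing the 'state' or
-- 'cases' key (KeyError), or a 'cases' string of a state occurring in ≥ 2 rows that is not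
-- a valid int literal (ValueError; a state occurring once is never converted).
def Pre_calculate (reader : List (List (String × String))) : Prop :=
  ∀ row ∈ reader,
    ((PySem.Dict.mk row).get? "state").isSome = true ∧
    ((PySem.Dict.mk row).get? "cases").isSome = true ∧
    (reader.countP (fun r => (PySem.Dict.mk r).get? "state" == (PySem.Dict.mk row).get? "state") ≤ 1 ∨
      (PySem.Int.ofStr? (((PySem.Dict.mk row).get? "cases").getD "")).isSome = true)
instance (reader : List (List (String × String))) : Decidable (Pre_calculate reader) := by
  unfold Pre_calculate; infer_instance

def pvWitness_calculate : (List (List (String × String))) :=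
  [[("state", "ca"), ("cases", "1")], [("state", "ca"), ("cases", "4")], [("state", "ny"), ("cases", "7")]]

def Spec_calculate (reader : List (List (String × String))) (out : List (String × List Int)) : Prop := out = calculate_alt reader
instance (reader : List (List (String × String))) (out : List (String × List Int)) : Decidable (Spec_calculate reader out) := by unfold Spec_calculate; infer_instance

-- ===== CLAIM (what is proved, stated in full; the proofs are below) =====
def Claim_equal_calculate : Prop := ∀ (reader : List (List (String × String))), Dom_calculate reader → Pre_calculate reader → Spec_calculate reader (calculate reader)

-- ===== LEMMAS AND PROOFS =====

-- value map over an association list (keys untouched)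
def mapVal {α β : Type} (f : α → β) (l : List (String × α)) : List (String × β) :=
  l.map (fun p => (p.1, f p.2))

-- the consecutive-delta list B computes for one state's case strings
def pvDeltas (vs : List String) : List Int :=
  List.zipWith (fun a b => pvInt b - pvInt a) vs (vs.drop 1)

-- one step of A's rolling 14-window
def rollA (l : List Int) (c : Int) : List Int :=
  if 14 < (l ++ [c]).length then (l ++ [c]).drop 1 else l ++ [c]

-- A's per-state new_cases value, as a function of the state's raw case strings
def fNC (vs : List String) : List Int := (pvDeltas vs).foldl rollA []
-- A's per-state previous_cases value
def fPC (vs : List String) : String := vs.getLastD ""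

lemma get?_mk_mapVal {α β : Type} (f : α → β) (l : List (String × α)) (k : String) :
    (PySem.Dict.mk (mapVal f l)).get? k = ((PySem.Dict.mk l).get? k).map f := by
  simp [PySem.Dict.get?, mapVal, List.find?_map, Function.comp_def]

lemma contains_mk_mapVal {α β : Type} (f : α → β) (l : List (String × α)) (k : String) :
    (PySem.Dict.mk (mapVal f l)).contains k = (PySem.Dict.mk l).contains k := by
  simp [PySem.Dict.contains, mapVal, List.any_map, Function.comp_def]

lemma mapVal_map_replace {α β : Type} (f : α → β) (l : List (String × α)) (s : String) (w : α) :
    mapVal f (l.map (fun p => if p.1 == s then (s, w) else p)) =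
      (mapVal f l).map (fun p => if p.1 == s then (s, f w) else p) := by
  simp only [mapVal, List.map_map]
  refine List.map_congr_left (fun p _ => ?_)
  by_cases h : p.1 = s <;> simp [h]

lemma pvDeltas_cons_cons (a b : String) (t : List String) :
    pvDeltas (a :: b :: t) = (pvInt b - pvInt a) :: pvDeltas (b :: t) := rfl

lemma pvDeltas_append (vs : List String) (h : vs ≠ []) (c : String) :
    pvDeltas (vs ++ [c]) = pvDeltas vs ++ [pvInt c - pvInt (vs.getLastD "")] := by
  induction vs with
  | nil => exact absurd rfl h
  | cons a t ih =>
    cases t with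
    | nil => rfl
    | cons b t' =>
      have := ih (by simp)
      simp only [List.cons_append, pvDeltas_cons_cons] at *
      rw [this]
      simp [pvDeltas]

lemma foldl_rollA (ds : List Int) (acc : List Int) (h : acc.length ≤ 14) :
    ds.foldl rollA acc = (acc ++ ds).drop (acc.length + ds.length - 14) := by
  induction ds generalizing acc with
  | nil => simp [Nat.sub_eq_zero_of_le h]
  | cons d t ih =>
    simp only [List.foldl_cons]
    by_cases hl : 14 < acc.length + 1
    · have hacc : acc.length = 14 := by omega
      have hr : rollA acc d = (acc ++ [d]).drop 1 := by simp [rollA, hl]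
      rw [hr, ih _ (by simp [hacc]), ← List.drop_append_of_le_length (by simp),
        List.drop_drop]
      have he : acc ++ [d] ++ t = acc ++ d :: t := by simp
      rw [he]
      congr 1
      simp [hacc]
      omega
    · have hr : rollA acc d = acc ++ [d] := by simp [rollA, hl]
      rw [hr, ih _ (by simp; omega)]
      rw [List.append_assoc]
      congr 1
      simp; omega

lemma fNC_eq_slice (vs : List String) :
    fNC vs = PySem.List.slice (pvDeltas vs) (some (-14)) none := by
  rw [PySem.List.slice_from_neg_ofNat _ 14 (by norm_num)]
  unfold fNC
  rw [foldl_rollA _ [] (by simp)]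
  simp

-- the simulation invariant between B's groups dict and A's (new_cases, previous_cases)
def pvInv (g : PySem.Dict String (List String))
    (st : PySem.Dict String (List Int) × PySem.Dict String String) : Prop :=
  st.1 = PySem.Dict.mk (mapVal fNC g.items) ∧
  st.2 = PySem.Dict.mk (mapVal fPC g.items) ∧
  g.keys.Nodup ∧ ∀ p ∈ g.items, p.2 ≠ []

lemma fNC_append (vs : List String) (h : vs ≠ []) (c : String) :
    fNC (vs ++ [c]) = rollA (fNC vs) (pvInt c - pvInt (vs.getLastD "")) := by
  unfold fNC
  rw [pvDeltas_append vs h c, List.foldl_append]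
  rfl

lemma Inv_step (g : PySem.Dict String (List String))
    (st : PySem.Dict String (List Int) × PySem.Dict String String)
    (row : List (String × String)) (h : pvInv g st) :
    pvInv (g.modify (pvField row "state") [] (fun l => l ++ [pvField row "cases"]))
        (calcStep st row) := by
  obtain ⟨h1, h2, h3, h4⟩ := h
  by_cases hcon : g.contains (pvField row "state") = true
  · -- the state was already seen: A takes the else branch, B appends to the group
    obtain ⟨vs, hvs⟩ : ∃ vs, g.get? (pvField row "state") = some vs := by
      rw [PySem.Dict.contains_eq_isSome_get?] at hcon
      exact Option.isSome_iff_exists.mp hcon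
    have hvne : vs ≠ [] := h4 _ (PySem.Dict.mem_items_of_get?_eq_some g hvs)
    have hgd : g.getD (pvField row "state") [] = vs := PySem.Dict.getD_of_get?_eq_some g [] hvs
    have hg' : g.modify (pvField row "state") [] (fun l => l ++ [pvField row "cases"])
        = g.insert (pvField row "state") (vs ++ [pvField row "cases"]) := by
      simp [PySem.Dict.modify, hgd]
    have hc2 : st.2.contains (pvField row "state") = true := by
      rw [h2, contains_mk_mapVal]; exact hcon
    have hpc : st.2.getD (pvField row "state") "" = fPC vs := by
      rw [h2, PySem.Dict.getD_eq_get?_getD, get?_mk_mapVal,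
        show (PySem.Dict.mk g.items) = g from rfl, hvs]
      rfl
    have hnc : st.1.getD (pvField row "state") [] = fNC vs := by
      rw [h1, PySem.Dict.getD_eq_get?_getD, get?_mk_mapVal,
        show (PySem.Dict.mk g.items) = g from rfl, hvs]
      rfl
    have hstep : calcStep st row =
        (st.1.insert (pvField row "state") (rollA (fNC vs) (pvInt (pvField row "cases") - pvInt (fPC vs))),
         st.2.insert (pvField row "state") (pvField row "cases")) := by
      unfold calcStep
      simp only [hc2, Bool.true_eq_false, if_false, hpc]
      have hm : st.1.modify (pvField row "state") []
            (fun l => l ++ [pvInt (pvField row "cases") - pvInt (fPC vs)])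
          = st.1.insert (pvField row "state")
              (fNC vs ++ [pvInt (pvField row "cases") - pvInt (fPC vs)]) := by
        simp [PySem.Dict.modify, hnc]
      rw [hm, PySem.Dict.getD_insert_self]
      by_cases hl : 14 < (fNC vs ++ [pvInt (pvField row "cases") - pvInt (fPC vs)]).length
      · simp only [hl, if_true]
        have hmm : (st.1.insert (pvField row "state")
              (fNC vs ++ [pvInt (pvField row "cases") - pvInt (fPC vs)])).modify
              (pvField row "state") [] (fun l => l.drop 1)
            = st.1.insert (pvField row "state")
              ((fNC vs ++ [pvInt (pvField row "cases") - pvInt (fPC vs)]).drop 1) := by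
          simp [PySem.Dict.modify, PySem.Dict.getD_insert_self, PySem.Dict.insert_insert_self]
        rw [hmm]
        congr 2
        unfold rollA
        rw [if_pos hl]
      · simp only [hl, if_false]
        congr 2
        unfold rollA
        rw [if_neg hl]
    rw [hstep, hg']
    refine ⟨?_, ?_, ?_, ?_⟩
    · apply PySem.Dict.ext
      rw [h1, PySem.Dict.items_insert_of_contains _ _ (by rw [contains_mk_mapVal]; exact hcon),
        PySem.Dict.items_insert_of_contains _ _ hcon]
      show (mapVal fNC g.items).map _ = mapVal fNC (g.items.map _)
      rw [mapVal_map_replace, fNC_append vs hvne]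
      rfl
    · apply PySem.Dict.ext
      rw [h2, PySem.Dict.items_insert_of_contains _ _ (by rw [contains_mk_mapVal]; exact hcon),
        PySem.Dict.items_insert_of_contains _ _ hcon]
      show (mapVal fPC g.items).map _ = mapVal fPC (g.items.map _)
      rw [mapVal_map_replace]
      simp [fPC]
    · rw [PySem.Dict.keys_insert_of_contains _ _ hcon]
      exact h3
    · intro p hp
      rcases (PySem.Dict.mem_items_insert _ _ _ _).mp hp with hpe | ⟨hpm, _⟩
      · subst hpe; simp
      · exact h4 _ hpm
  · -- first occurrence of the state: A inserts [] and the raw value, B starts the group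
    have hcon' : g.contains (pvField row "state") = false := by
      simpa using hcon
    have hg' : g.modify (pvField row "state") [] (fun l => l ++ [pvField row "cases"])
        = g.insert (pvField row "state") [pvField row "cases"] := by
      simp [PySem.Dict.modify, PySem.Dict.getD_of_not_contains g [] hcon']
    have hc2 : st.2.contains (pvField row "state") = false := by
      rw [h2, contains_mk_mapVal]; exact hcon'
    have hstep : calcStep st row =
        (st.1.insert (pvField row "state") [],
         st.2.insert (pvField row "state") (pvField row "cases")) := by
      unfold calcStep
      simp only [hc2, if_true]
    rw [hstep, hg']
    refine ⟨?_, ?_, ?_, ?_⟩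
    · apply PySem.Dict.ext
      rw [h1, PySem.Dict.items_insert_of_not_contains _ _ (by rw [contains_mk_mapVal]; exact hcon'),
        PySem.Dict.items_insert_of_not_contains _ _ hcon']
      show mapVal fNC g.items ++ [(pvField row "state", [])]
          = mapVal fNC (g.items ++ [(pvField row "state", [pvField row "cases"])])
      simp [mapVal]
      rfl
    · apply PySem.Dict.ext
      rw [h2, PySem.Dict.items_insert_of_not_contains _ _ (by rw [contains_mk_mapVal]; exact hcon'),
        PySem.Dict.items_insert_of_not_contains _ _ hcon']
      simp [mapVal]
      rfl
    · rw [PySem.Dict.keys_insert_of_not_contains _ _ hcon']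
      have hnm : pvField row "state" ∉ g.keys := by
        rw [← PySem.Dict.contains_iff_mem_keys]
        simp [hcon']
      simp [List.nodup_append, h3]
      intro a ha he
      exact hnm (he ▸ ha)
    · intro p hp
      rcases (PySem.Dict.mem_items_insert _ _ _ _).mp hp with hpe | ⟨hpm, _⟩
      · subst hpe; simp
      · exact h4 _ hpm

lemma Inv_foldl (rs : List (List (String × String)))
    (g : PySem.Dict String (List String))
    (st : PySem.Dict String (List Int) × PySem.Dict String String) (h : pvInv g st) :
    pvInv (rs.foldl (fun g row => g.modify (pvField row "state") [] (fun l => l ++ [pvField row "cases"])) g)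
        (rs.foldl calcStep st) := by
  induction rs generalizing g st with
  | nil => exact h
  | cons r rs ih => exact ih _ _ (Inv_step g st r h)

-- ===== VERDICT (by name: the statement is the Claim_ definition above) =====
theorem calculate_spec : Claim_equal_calculate := by
  intro reader _ _
  unfold Spec_calculate calculate calculate_alt
  have h := Inv_foldl reader PySem.Dict.empty (PySem.Dict.empty, PySem.Dict.empty)
    ⟨rfl, rfl, by simp [PySem.Dict.keys_empty], by simp [PySem.Dict.empty]⟩
  obtain ⟨h1, _, _, _⟩ := h
  rw [h1]
  show mapVal fNC _ = _
  unfold mapVal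
  refine List.map_congr_left (fun p _ => ?_)
  rw [fNC_eq_slice]
  rfl
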